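-- pv_equiv track=rewrite | github.com/engelshamy2021-sudo/elshamy-iwcf-app | utils/data_manager.py | get_user_level
-- ===== SOURCE A (Python) =====
-- def get_user_level(xp):
--     """Get user level name"""
--     levels = [
--         (0, "Beginner"),
--         (100, "Learner"),
--         (300, "Student"),
--         (600, "Practitioner"),
--         (1000, "Skilled"),
--         (1500, "Advanced"),
--         (2200, "Expert"),
--         (3000, "Master"),
--         (4000, "Elite"),
--         (5500, "Legend"),
--         (7500, "IWCF Champion")
--     ]
--
--     for min_xp, level_name in reversed(levels):
--         if xp >= min_xp:
--             return level_name
--     return "Beginner"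
-- ===== SOURCE B (Python) =====
-- def get_user_level(xp):
--     """Get user level name"""
--     thresholds = [0, 100, 300, 600, 1000, 1500, 2200, 3000, 4000, 5500, 7500]
--     names = ["Beginner", "Learner", "Student", "Practitioner", "Skilled",
--              "Advanced", "Expert", "Master", "Elite", "Legend", "IWCF Champion"]
--     # binary search: insertion point of xp in thresholds (bisect_right)
--     lo, hi = 0, len(thresholds)
--     while lo < hi:
--         mid = (lo + hi) // 2
--         if xp < thresholds[mid]:
--             hi = mid
--         else:
--             lo = mid + 1
--     return names[lo - 1] if lo > 0 else "Beginner"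
-- ===== Notes on version B (the rewrite author's own statement) =====
-- stated objective: alternative
-- what changed: Replaces A's reverse linear scan over the (threshold, name) table with a hand-written binary search (bisect_right) over the sorted thresholds plus a parallel name list, falling back to 'Beginner' when xp is below all thresholds.
import Mathlib
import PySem

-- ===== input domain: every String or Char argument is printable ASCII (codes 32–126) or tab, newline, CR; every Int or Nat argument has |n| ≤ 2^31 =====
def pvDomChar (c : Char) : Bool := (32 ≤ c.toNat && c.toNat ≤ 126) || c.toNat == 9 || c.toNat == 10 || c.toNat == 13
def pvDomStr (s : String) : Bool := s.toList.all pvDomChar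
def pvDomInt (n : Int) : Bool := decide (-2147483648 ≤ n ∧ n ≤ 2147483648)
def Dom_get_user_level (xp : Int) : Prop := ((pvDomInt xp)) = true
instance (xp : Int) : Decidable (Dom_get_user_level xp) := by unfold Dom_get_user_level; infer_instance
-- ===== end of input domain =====

-- B replaces A's reverse linear scan of the level table with a binary search over the
-- sorted thresholds (objective: alternative/idiomatic table lookup; identical outputs).

-- ===== PORT A =====
def pvLevels : List (Int × String) :=
  [(0, "Beginner"), (100, "Learner"), (300, "Student"), (600, "Practitioner"),
   (1000, "Skilled"), (1500, "Advanced"), (2200, "Expert"), (3000, "Master"),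
   (4000, "Elite"), (5500, "Legend"), (7500, "IWCF Champion")]

-- 'for min_xp, level_name in reversed(levels): if xp >= min_xp: return level_name'
def pvScanA (xp : Int) : List (Int × String) → String
  | [] => "Beginner"
  | (min_xp, level_name) :: rest =>
      if xp ≥ min_xp then level_name else pvScanA xp rest

def get_user_level (xp : Int) : String := pvScanA xp pvLevels.reverse

-- ===== PORT B =====
def pvThresholds : List Int := [0, 100, 300, 600, 1000, 1500, 2200, 3000, 4000, 5500, 7500]
def pvNames : List String :=
  ["Beginner", "Learner", "Student", "Practitioner", "Skilled",
   "Advanced", "Expert", "Master", "Elite", "Legend", "IWCF Champion"]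

-- the 'while lo < hi' loop of Source B; fuel = hi - lo bounds the iterations
def pvBisect (xp : Int) (lo hi : Nat) (fuel : Nat) : Nat :=
  match fuel with
  | 0 => lo
  | fuel + 1 =>
      if lo < hi then
        if xp < pvThresholds.getD ((lo + hi) / 2) 0 then pvBisect xp lo ((lo + hi) / 2) fuel
        else pvBisect xp ((lo + hi) / 2 + 1) hi fuel
      else lo

def get_user_level_alt (xp : Int) : String :=
  let lo := pvBisect xp 0 pvThresholds.length pvThresholds.length
  if lo > 0 then pvNames.getD (lo - 1) "Beginner" else "Beginner"

-- ===== PRECONDITION & SPEC =====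
def Spec_get_user_level (xp : Int) (out : String) : Prop := out = get_user_level_alt xp
instance (xp : Int) (out : String) : Decidable (Spec_get_user_level xp out) := by unfold Spec_get_user_level; infer_instance

-- ===== CLAIM (what is proved, stated in full; the proofs are below) =====
def Claim_equal_get_user_level : Prop := ∀ (xp : Int), Dom_get_user_level xp → Spec_get_user_level xp (get_user_level xp)

-- ===== LEMMAS AND PROOFS =====

-- ===== VERDICT (by name: the statement is the Claim_ definition above) =====
set_option maxHeartbeats 2000000 in
theorem get_user_level_spec : Claim_equal_get_user_level := by
  intro xp _
  unfold Spec_get_user_level get_user_level get_user_level_alt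
  simp [pvScanA, pvBisect, pvLevels, pvThresholds, pvNames]
  split_ifs <;> first | rfl | omega
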